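-- pv_equiv track=rewrite | github.com/Setka1324/minor | module_3/temperature.py | count_seasons
-- ===== SOURCE A (Python) =====
-- def count_seasons(max_dates, max_temps):
--
--     summer_days_per_year = {}
--     tropical_days_per_year = {}
--
--     for date, temp in zip(max_dates, max_temps):
--         year = date[0]
--
--         if year not in summer_days_per_year:
--             summer_days_per_year[year] = 0
--         if year not in tropical_days_per_year:
--             tropical_days_per_year[year] = 0
--
--         if temp >= 25:
--             summer_days_per_year[year] += 1
--
--
--
--             if temp >= 30:
--                 tropical_days_per_year[year] += 1
--
--     return summer_days_per_year, tropical_days_per_year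
-- ===== SOURCE B (Python) =====
-- def count_seasons(max_dates, max_temps):
--     # Staged passes: seed each year with 0, then count each category in its own flat pass.
--     days = list(zip(max_dates, max_temps))
--     years = [date[0] for date, _temp in days]
--
--     summer_days_per_year = {}
--     for y in years:
--         summer_days_per_year.setdefault(y, 0)
--     for (year, _month, _day), temp in days:
--         if temp >= 25:
--             summer_days_per_year[year] += 1
--
--     tropical_days_per_year = {}
--     for y in years:
--         tropical_days_per_year.setdefault(y, 0)
--     for (year, _month, _day), temp in days:
--         if temp >= 30:
--             tropical_days_per_year[year] += 1
--
--     return summer_days_per_year, tropical_days_per_year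
-- ===== Notes on version B (the rewrite author's own statement) =====
-- stated objective: alternative
-- what changed: A's single fused loop that initializes years on demand and counts both categories with nested conditionals is replaced by staged passes: seed every year of the zipped days with 0 (setdefault), then one flat counting pass per category (summer >=25, tropical >=30), each dict built independently.
import Mathlib
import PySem

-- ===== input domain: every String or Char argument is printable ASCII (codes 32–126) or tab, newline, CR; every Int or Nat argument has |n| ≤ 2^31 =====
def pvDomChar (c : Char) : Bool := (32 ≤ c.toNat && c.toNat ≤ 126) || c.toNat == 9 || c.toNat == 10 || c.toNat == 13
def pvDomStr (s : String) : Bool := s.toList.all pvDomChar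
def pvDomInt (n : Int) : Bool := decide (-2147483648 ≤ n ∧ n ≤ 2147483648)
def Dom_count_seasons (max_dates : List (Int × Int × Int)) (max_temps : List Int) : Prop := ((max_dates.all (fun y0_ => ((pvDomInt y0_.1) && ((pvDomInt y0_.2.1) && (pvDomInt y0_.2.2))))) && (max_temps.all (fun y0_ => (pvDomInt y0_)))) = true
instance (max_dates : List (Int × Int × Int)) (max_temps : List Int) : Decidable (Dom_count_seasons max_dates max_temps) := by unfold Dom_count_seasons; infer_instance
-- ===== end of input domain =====

-- B replaces A's single fused init-on-demand loop by staged passes (seed every year with 0 via setdefault,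
-- then one flat counting pass per category); objective: alternative decomposition, same asymptotic cost.

-- ===== PORT A =====
def count_seasons (max_dates : List (Int × Int × Int)) (max_temps : List Int) :
    (List (Int × Int)) × (List (Int × Int)) :=
  let st := (max_dates.zip max_temps).foldl
    (fun (st : PySem.Dict Int Int × PySem.Dict Int Int) dt =>
      let year := dt.1.1
      let s := if st.1.contains year then st.1 else st.1.insert year 0
      let t := if st.2.contains year then st.2 else st.2.insert year 0
      if 25 ≤ dt.2 then
        let s' := s.insert year (s.getD year 0 + 1)
        if 30 ≤ dt.2 then (s', t.insert year (t.getD year 0 + 1)) else (s', t)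
      else (s, t))
    (PySem.Dict.empty, PySem.Dict.empty)
  (st.1.items, st.2.items)

-- ===== PORT B =====
def count_seasons_alt (max_dates : List (Int × Int × Int)) (max_temps : List Int) :
    (List (Int × Int)) × (List (Int × Int)) :=
  let days := max_dates.zip max_temps
  let years := days.map (fun p => p.1.1)
  let summer0 := years.foldl (fun d y => d.setdefault y 0) (PySem.Dict.empty : PySem.Dict Int Int)
  let summer := days.foldl (fun d p => if 25 ≤ p.2 then d.insert p.1.1 (d.getD p.1.1 0 + 1) else d) summer0
  let tropical0 := years.foldl (fun d y => d.setdefault y 0) (PySem.Dict.empty : PySem.Dict Int Int)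
  let tropical := days.foldl (fun d p => if 30 ≤ p.2 then d.insert p.1.1 (d.getD p.1.1 0 + 1) else d) tropical0
  (summer.items, tropical.items)

-- ===== PRECONDITION & SPEC =====
def Spec_count_seasons (max_dates : List (Int × Int × Int)) (max_temps : List Int) (out : (List (Int × Int)) × (List (Int × Int))) : Prop := out = count_seasons_alt max_dates max_temps
instance (max_dates : List (Int × Int × Int)) (max_temps : List Int) (out : (List (Int × Int)) × (List (Int × Int))) : Decidable (Spec_count_seasons max_dates max_temps out) := by unfold Spec_count_seasons; infer_instance

-- ===== CLAIM =====
def Claim_equal_count_seasons : Prop := ∀ (max_dates : List (Int × Int × Int)) (max_temps : List Int), Dom_count_seasons max_dates max_temps → Spec_count_seasons max_dates max_temps (count_seasons max_dates max_temps)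

-- ===== LEMMAS AND PROOFS =====

-- proof-only abbreviations for the loop bodies
abbrev pvD := (Int × Int × Int) × Int

def pvInit (d : PySem.Dict Int Int) (p : pvD) : PySem.Dict Int Int := d.setdefault p.1.1 0

def pvCnt (c : pvD → Bool) (d : PySem.Dict Int Int) (p : pvD) : PySem.Dict Int Int :=
  if c p then d.insert p.1.1 (d.getD p.1.1 0 + 1) else d

def pvAC (c : pvD → Bool) (d : PySem.Dict Int Int) (p : pvD) : PySem.Dict Int Int :=
  pvCnt c (pvInit d p) p

-- inserting a fresh key commutes with overwriting a present key
theorem pv_insert_swap (d : PySem.Dict Int Int) (y z v : Int)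
    (hy : d.contains y = true) (hz : d.contains z = false) :
    (d.insert y v).insert z 0 = (d.insert z 0).insert y v := by
  have hne : z ≠ y := by intro h; rw [h, hy] at hz; cases hz
  have h1 : (d.insert y v).contains z = false := by
    rw [PySem.Dict.contains_insert, hz]; simp [hne]
  have h2 : (d.insert z 0).contains y = true := by
    rw [PySem.Dict.contains_insert, hy]; simp
  apply PySem.Dict.ext
  rw [PySem.Dict.items_insert_of_not_contains _ _ h1,
      PySem.Dict.items_insert_of_contains _ _ hy,
      PySem.Dict.items_insert_of_contains _ _ h2,
      PySem.Dict.items_insert_of_not_contains _ _ hz,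
      List.map_append]
  simp [hne]

-- the init fold preserves the value at a present key
theorem pv_getD_init (l : List pvD) (d : PySem.Dict Int Int) (y : Int)
    (hy : d.contains y = true) : (l.foldl pvInit d).getD y 0 = d.getD y 0 := by
  induction l generalizing d with
  | nil => rfl
  | cons p l ih =>
      simp only [List.foldl_cons]
      by_cases hc : d.contains p.1.1 = true
      · rw [pvInit, PySem.Dict.setdefault_of_contains _ _ hc, ih _ hy]
      · have hc' : d.contains p.1.1 = false := by simpa using hc
        have hne : y ≠ p.1.1 := by intro h; rw [← h, hy] at hc'; cases hc'
        rw [pvInit, PySem.Dict.setdefault_of_not_contains _ _ hc',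
            ih _ (by rw [PySem.Dict.contains_insert, hy, Bool.or_true]),
            PySem.Dict.getD_insert_of_ne _ _ _ hne]

-- overwriting a present key commutes with the init fold
theorem pv_init_insert_comm (l : List pvD) (d : PySem.Dict Int Int) (y v : Int)
    (hy : d.contains y = true) :
    l.foldl pvInit (d.insert y v) = (l.foldl pvInit d).insert y v := by
  induction l generalizing d with
  | nil => rfl
  | cons p l ih =>
      simp only [List.foldl_cons]
      by_cases hc : d.contains p.1.1 = true
      · rw [pvInit, pvInit, PySem.Dict.setdefault_of_contains _ _ hc,
            PySem.Dict.setdefault_of_contains _ _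
              (by rw [PySem.Dict.contains_insert, hc, Bool.or_true]),
            ih _ hy]
      · have hc' : d.contains p.1.1 = false := by simpa using hc
        have hne : p.1.1 ≠ y := by intro h; rw [h, hy] at hc'; cases hc'
        have h1 : (d.insert y v).contains p.1.1 = false := by
          rw [PySem.Dict.contains_insert, hc']; simp [hne]
        rw [pvInit, pvInit, PySem.Dict.setdefault_of_not_contains _ _ h1,
            PySem.Dict.setdefault_of_not_contains _ _ hc',
            pv_insert_swap _ _ _ _ hy hc',
            ih _ (by rw [PySem.Dict.contains_insert, hy, Bool.or_true])]

-- MAIN: A's fused init+count loop = init pass then count pass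
theorem pv_main (c : pvD → Bool) (l : List pvD) (d : PySem.Dict Int Int) :
    l.foldl (pvAC c) d = l.foldl (pvCnt c) (l.foldl pvInit d) := by
  induction l generalizing d with
  | nil => rfl
  | cons p l ih =>
      simp only [List.foldl_cons]
      rw [show pvAC c d p = pvCnt c (pvInit d p) p from rfl, ih]
      congr 1
      have hcy : (pvInit d p).contains p.1.1 = true := by
        rw [pvInit, PySem.Dict.contains_setdefault]; simp
      by_cases hc : c p = true
      · simp only [pvCnt, hc, if_pos]
        rw [pv_init_insert_comm _ _ _ _ hcy, pv_getD_init _ _ _ hcy]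
      · have hc' : c p = false := by simpa using hc
        simp only [pvCnt, hc', Bool.false_eq_true, if_false]

-- a fold whose step acts componentwise splits into two folds
theorem pv_foldl_pair {α β γ : Type} (l : List γ) (step : α × β → γ → α × β)
    (f : α → γ → α) (g : β → γ → β) (h : ∀ st p, step st p = (f st.1 p, g st.2 p)) :
    ∀ (s : α) (t : β), l.foldl step (s, t) = (l.foldl f s, l.foldl g t) := by
  induction l with
  | nil => intro s t; rfl
  | cons p l ih => intro s t; simp only [List.foldl_cons, h]; exact ih _ _

-- A's conditional init is setdefault
theorem pv_init_eq (d : PySem.Dict Int Int) (y : Int) :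
    (if d.contains y then d else d.insert y 0) = d.setdefault y 0 := by
  by_cases h : d.contains y = true
  · rw [if_pos h, PySem.Dict.setdefault_of_contains _ _ h]
  · have h' : d.contains y = false := by simpa using h
    rw [if_neg h, PySem.Dict.setdefault_of_not_contains _ _ h']

theorem pv_final (max_dates : List (Int × Int × Int)) (max_temps : List Int) :
    count_seasons max_dates max_temps = count_seasons_alt max_dates max_temps := by
  unfold count_seasons count_seasons_alt
  simp only []
  rw [pv_foldl_pair (max_dates.zip max_temps) _
        (pvAC (fun p => decide (25 ≤ p.2)))
        (pvAC (fun p => decide (25 ≤ p.2) && decide (30 ≤ p.2)))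
        (by
          intro st p
          simp only [pvAC, pvCnt, pvInit, pv_init_eq, decide_eq_true_eq, Bool.and_eq_true]
          split_ifs <;> first | rfl | tauto)]
  rw [pv_main, pv_main, List.foldl_map]
  have hc : (fun (p : pvD) => decide (25 ≤ p.2) && decide (30 ≤ p.2)) = (fun p => decide (30 ≤ p.2)) := by
    funext p
    by_cases h : 30 ≤ p.2
    · simp [h, show (25:Int) ≤ p.2 by omega]
    · simp [h]
  rw [hc]
  have hcnt25 : (fun (d : PySem.Dict Int Int) (p : pvD) => if 25 ≤ p.2 then d.insert p.1.1 (d.getD p.1.1 0 + 1) else d) = pvCnt (fun p => decide (25 ≤ p.2)) := by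
    funext d p; simp [pvCnt]
  have hcnt30 : (fun (d : PySem.Dict Int Int) (p : pvD) => if 30 ≤ p.2 then d.insert p.1.1 (d.getD p.1.1 0 + 1) else d) = pvCnt (fun p => decide (30 ≤ p.2)) := by
    funext d p; simp [pvCnt]
  rw [hcnt25, hcnt30]
  rfl

-- ===== VERDICT =====
theorem count_seasons_spec : Claim_equal_count_seasons := by
  intro max_dates max_temps _
  exact pv_final max_dates max_temps
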